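-- pv_equiv track=rewrite | github.com/shi1412/py-leet-code | company_frequent/fb.py | helper
-- ===== SOURCE A (Python) =====
-- def helper(s, left, right):
--     i, j = left, right
--     while i < j:
--         if s[i] != s[j]:
--             return False
--
--         i += 1
--         j -= 1
--
--     return True
-- ===== SOURCE B (Python) =====
-- def helper(s, left, right):
--     if left >= right:
--         return True
--     sub = s[left:right + 1]
--     return sub == sub[::-1]
-- ===== Notes on version B (the rewrite author's own statement) =====
-- stated objective: idiomatic
-- what changed: Replaces the index-by-index two-pointer while loop with the idiomatic slice-and-reverse palindrome test sub == sub[::-1] on the substring s[left:right+1].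
-- outside the precondition, e.g. on helper('abc', -3, -1): A returns False, B returns True
import Mathlib
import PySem

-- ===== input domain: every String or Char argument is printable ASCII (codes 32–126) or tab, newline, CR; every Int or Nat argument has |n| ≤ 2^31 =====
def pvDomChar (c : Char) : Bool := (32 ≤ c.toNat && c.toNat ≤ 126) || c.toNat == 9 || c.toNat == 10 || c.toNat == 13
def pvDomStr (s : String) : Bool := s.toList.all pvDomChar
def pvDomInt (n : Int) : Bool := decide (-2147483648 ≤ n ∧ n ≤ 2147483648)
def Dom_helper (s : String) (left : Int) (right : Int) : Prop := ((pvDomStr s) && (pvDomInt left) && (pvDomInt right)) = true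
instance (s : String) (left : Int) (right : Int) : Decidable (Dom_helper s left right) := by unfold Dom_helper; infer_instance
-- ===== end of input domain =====

-- B replaces A's two-pointer while loop by the idiomatic slice-and-reverse test sub == sub[::-1].

-- ===== PORT A =====
-- the while loop: i, j walk inward; s[i] / s[j] is PySem.List.pyGetD on the char list
-- (default ' ' is never used under Pre_helper, where every accessed index is in range)
def helperLoop (cs : List Char) (i j : Int) : Bool :=
  if i < j then
    if PySem.List.pyGetD cs i ' ' ≠ PySem.List.pyGetD cs j ' ' then false
    else helperLoop cs (i + 1) (j - 1)
  else true
termination_by (j - i).toNat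
decreasing_by omega

def helper (s : String) (left : Int) (right : Int) : Bool :=
  helperLoop s.toList left right

-- ===== PORT B =====
-- Source B: trivial range → True; else sub = s[left:right+1]; sub == sub[::-1] (s[::-1] is reverse)
def helper_alt (s : String) (left : Int) (right : Int) : Bool :=
  if left ≥ right then true
  else
    let sub := PySem.List.slice s.toList (some left) (some (right + 1))
    sub == sub.reverse

-- ===== PRECONDITION & SPEC =====
-- Pre_ excludes the inputs on which A raises IndexError (left < right with an index outside
-- [-len, len)), and the negative-index wraparound inputs left < 0 ≤ ... on which A's pairwise
-- comparison of wrapped positions is an artefact of Python indexing that no slice reproduces.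
def Pre_helper (s : String) (left : Int) (right : Int) : Prop :=
  left ≥ right ∨ (0 ≤ left ∧ right < (s.toList.length : Int))
instance (s : String) (left : Int) (right : Int) : Decidable (Pre_helper s left right) := by unfold Pre_helper; infer_instance

def pvWitness_helper : String × Int × Int := ("aba", 0, 2)

def Spec_helper (s : String) (left : Int) (right : Int) (out : Bool) : Prop := out = helper_alt s left right
instance (s : String) (left : Int) (right : Int) (out : Bool) : Decidable (Spec_helper s left right out) := by unfold Spec_helper; infer_instance

-- ===== CLAIM (what is proved, stated in full; the proofs are below) =====
def Claim_equal_helper : Prop := ∀ (s : String) (left : Int) (right : Int), Dom_helper s left right → Pre_helper s left right → Spec_helper s left right (helper s left right)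

-- ===== LEMMAS AND PROOFS =====

-- a list of length ≤ 1 beq-equals its reverse
lemma short_beq_reverse (l : List Char) (h : l.length ≤ 1) : (l == l.reverse) = true := by
  match l, h with
  | [], _ => rfl
  | [a], _ => simp

-- when the pointers have met or crossed, the substring has length ≤ 1
lemma short_sub (cs : List Char) (i j : Int) (hij : j ≤ i) (hi : 0 ≤ i) :
    ((cs.drop i.toNat).take ((j + 1).toNat - i.toNat)).length ≤ 1 := by
  have h1 := List.length_take_le ((j + 1).toNat - i.toNat) (cs.drop i.toNat)
  omega

-- palindrome peel: a :: l ++ [b] equals its own reverse iff a = b and l equals its reverse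
lemma palin_wrap (a b : Char) (l : List Char) :
    ((a :: (l ++ [b])) == (a :: (l ++ [b])).reverse) = ((a == b) && (l == l.reverse)) := by
  have hrev : (a :: (l ++ [b])).reverse = b :: (l.reverse ++ [a]) := by simp
  have key : (a :: (l ++ [b]) = (a :: (l ++ [b])).reverse) ↔ (a = b ∧ l = l.reverse) := by
    rw [hrev]
    constructor
    · intro h
      injection h with h1 h2
      subst h1
      exact ⟨rfl, List.append_inj_left h2 (by simp)⟩
    · rintro ⟨rfl, hl⟩
      rw [← hl]
  rw [Bool.eq_iff_iff]
  simp only [beq_iff_eq, Bool.and_eq_true]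
  exact key

-- the loop computes "the substring cs[i..j] equals its reverse", for 0 ≤ i, j < |cs|
lemma helperLoop_eq_palin (n : Nat) (cs : List Char) (i j : Int)
    (hn : (j - i).toNat ≤ n) (hi : 0 ≤ i) (hj : j < (cs.length : Int)) :
    helperLoop cs i j =
      (((cs.drop i.toNat).take ((j + 1).toNat - i.toNat)) ==
       ((cs.drop i.toNat).take ((j + 1).toNat - i.toNat)).reverse) := by
  induction n generalizing i j with
  | zero =>
    rw [helperLoop, if_neg (by omega)]
    exact (short_beq_reverse _ (short_sub cs i j (by omega) hi)).symm
  | succ n ih =>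
    by_cases hij : i < j
    · -- decompose the substring as cs[i] :: middle ++ [cs[j]]
      have hi' : i.toNat < cs.length := by omega
      have hj' : j.toNat < cs.length := by omega
      have e1 : (i + 1).toNat = i.toNat + 1 := by omega
      have e2 : ((j - 1) + 1).toNat = j.toNat := by omega
      have hdrop : cs.drop i.toNat = cs[i.toNat] :: cs.drop (i.toNat + 1) :=
        List.drop_eq_getElem_cons hi'
      have hlen : (j + 1).toNat - i.toNat = ((j.toNat - (i.toNat + 1)) + 1) + 1 := by omega
      have hje : i.toNat + 1 + (j.toNat - (i.toNat + 1)) = j.toNat := by omega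
      have hidx : (cs.drop (i.toNat + 1))[j.toNat - (i.toNat + 1)]? = some cs[j.toNat] := by
        rw [List.getElem?_drop, hje, List.getElem?_eq_getElem hj']
      have hsub : (cs.drop i.toNat).take ((j + 1).toNat - i.toNat) =
          cs[i.toNat] :: (((cs.drop (i.toNat + 1)).take (j.toNat - (i.toNat + 1))) ++ [cs[j.toNat]]) := by
        rw [hlen, hdrop, List.take_succ_cons]
        congr 1
        rw [List.take_add_one, hidx]
        rfl
      have hga : PySem.List.pyGetD cs i ' ' = cs[i.toNat] :=
        PySem.List.pyGetD_eq_getElem cs ' ' hi (by omega)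
      have hgb : PySem.List.pyGetD cs j ' ' = cs[j.toNat] :=
        PySem.List.pyGetD_eq_getElem cs ' ' (by omega) (by omega)
      rw [helperLoop, if_pos hij, hsub, palin_wrap, hga, hgb]
      have hn' : (j - 1 - (i + 1)).toNat ≤ n := by omega
      by_cases hc : cs[i.toNat] = cs[j.toNat]
      · rw [if_neg (by simp [hc]), ih (i + 1) (j - 1) hn' (by omega) (by omega), e1, e2]
        simp [hc]
      · rw [if_pos (by simp [hc])]
        simp [hc]
    · rw [helperLoop, if_neg hij]
      exact (short_beq_reverse _ (short_sub cs i j (by omega) hi)).symm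

-- ===== VERDICT (by name: the statement is the Claim_ definition above) =====
theorem helper_spec : Claim_equal_helper := by
  intro s left right _ hpre
  unfold Spec_helper helper helper_alt
  by_cases h : left ≥ right
  · rw [if_pos h, helperLoop, if_neg (by omega)]
  · rw [if_neg h]
    rcases hpre with h' | ⟨hl, hr⟩
    · omega
    · show helperLoop s.toList left right =
        (PySem.List.slice s.toList (some left) (some (right + 1)) ==
         (PySem.List.slice s.toList (some left) (some (right + 1))).reverse)
      rw [PySem.List.slice_toNat s.toList hl (by omega)]
      exact helperLoop_eq_palin (right - left).toNat s.toList left right le_rfl hl hr
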